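-- pv_equiv track=rewrite | github.com/richardvanderveer/python-tools | Offline_Translate/Offline_Translate.py | _split_voor_marian
-- ===== SOURCE A (Python) =====
-- def _split_voor_marian(text: str, max_chars: int = 600) -> list:
--     """Splits tekst voor MarianMT op zinsgrenzen."""
--     if len(text) <= max_chars:
--         return [text]
--     segmenten = []
--     huidig = ""
--     for char in text:
--         huidig += char
--         if char in ".!?\n" and len(huidig.strip()) > 20:
--             segmenten.append(huidig.strip())
--             huidig = ""
--     if huidig.strip():
--         segmenten.append(huidig.strip())
--     return segmenten if segmenten else [text]
-- ===== SOURCE B (Python) =====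
-- def _scan(s, i):
--     """Index of the first sentence-ending char at/after i whose prefix strips to > 20 chars, else None."""
--     while i < len(s):
--         if s[i] in ".!?\n" and len(s[:i + 1].strip()) > 20:
--             return i
--         i += 1
--     return None
--
--
-- def _segments(s):
--     """Cut s at successive sentence boundaries, stripping each piece."""
--     out = []
--     while True:
--         i = _scan(s, 0)
--         if i is None:
--             rest = s.strip()
--             if rest:
--                 out.append(rest)
--             return out
--         out.append(s[:i + 1].strip())
--         s = s[i + 1:]
--
--
-- def _split_voor_marian(text: str, max_chars: int = 600) -> list:
--     """Splits tekst voor MarianMT op zinsgrenzen (cut-point search on the remaining text, then slice)."""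
--     if len(text) <= max_chars:
--         return [text]
--     segmenten = _segments(text)
--     return segmenten if segmenten else [text]
-- ===== Notes on version B (the rewrite author's own statement) =====
-- stated objective: alternative
-- what changed: B replaces A's char-by-char accumulator loop by a two-level decomposition: a scan that finds the next cut index in the remaining text, and an outer loop that slices off and strips one segment per cut, re-running the scan on the remaining suffix.
import Mathlib
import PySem

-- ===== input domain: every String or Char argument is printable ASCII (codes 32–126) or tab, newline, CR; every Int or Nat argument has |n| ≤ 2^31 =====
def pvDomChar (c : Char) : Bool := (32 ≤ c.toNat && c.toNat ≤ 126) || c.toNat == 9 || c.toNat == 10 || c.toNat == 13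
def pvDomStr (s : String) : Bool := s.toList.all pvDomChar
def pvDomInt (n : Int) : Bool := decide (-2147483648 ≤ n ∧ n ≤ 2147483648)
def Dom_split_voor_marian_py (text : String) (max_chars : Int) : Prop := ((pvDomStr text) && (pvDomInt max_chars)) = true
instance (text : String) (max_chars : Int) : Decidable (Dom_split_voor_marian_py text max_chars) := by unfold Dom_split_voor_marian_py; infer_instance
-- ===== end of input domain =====

-- B replaces A's char-by-char accumulator loop by a cut-point scan plus slicing: find the next
-- sentence boundary in the remaining text, slice off and strip that piece, repeat on the suffix.
-- Objective: alternative decomposition (same asymptotic cost).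

-- ===== PORT A =====
-- the loop body of A's for-loop: append char to the buffer, cut if sentence ends and strip is long
def pvStepA (st : List String × List Char) (ch : Char) : List String × List Char :=
  let huidig := st.2 ++ [ch]
  if (ch == '.' || ch == '!' || ch == '?' || ch == '\n') &&
      decide (20 < (PySem.Chars.strip huidig).length) then
    (st.1 ++ [String.ofList (PySem.Chars.strip huidig)], ([] : List Char))
  else (st.1, huidig)

-- literal transliteration of A: accumulate `huidig`, strip it at every sentence-ending char
def split_voor_marian_py (text : String) (max_chars : Int) : List String :=
  if (PySem.Str.len text : Int) ≤ max_chars then [text]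
  else
    let st := text.toList.foldl pvStepA (([] : List String), ([] : List Char))
    let segmenten := if (PySem.Chars.strip st.2).isEmpty then st.1
                     else st.1 ++ [String.ofList (PySem.Chars.strip st.2)]
    if segmenten.isEmpty then [text] else segmenten

-- ===== PORT B =====
-- Source B's `_scan` while-loop, structurally recursive on the unvisited suffix `rest` = s.drop i:
-- index of the first cut position at/after i, else none
def pvScanGo (s : List Char) : List Char → Nat → Option Nat
  | [], _ => none
  | c :: rest, i =>
    if (c == '.' || c == '!' || c == '?' || c == '\n') &&
        decide (20 < (PySem.Chars.strip (s.take (i + 1))).length) then some i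
    else pvScanGo s rest (i + 1)

def pvScan (s : List Char) (i : Nat) : Option Nat := pvScanGo s (s.drop i) i

-- Source B's `_segments` while-loop: cut the remaining text at the first boundary, strip the piece,
-- repeat on the suffix; `fuel` only makes the recursion structural (any fuel > s.length suffices)
def pvSegsGo : Nat → List Char → List String
  | 0, _ => []
  | n + 1, s =>
    match pvScan s 0 with
    | some i => String.ofList (PySem.Chars.strip (s.take (i + 1))) :: pvSegsGo n (s.drop (i + 1))
    | none =>
      let rest := PySem.Chars.strip s
      if rest.isEmpty then [] else [String.ofList rest]

def pvSegs (s : List Char) : List String := pvSegsGo (s.length + 1) s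

-- literal transliteration of B
def split_voor_marian_py_alt (text : String) (max_chars : Int) : List String :=
  if (PySem.Str.len text : Int) ≤ max_chars then [text]
  else
    let segmenten := pvSegs text.toList
    if segmenten.isEmpty then [text] else segmenten

-- ===== PRECONDITION & SPEC =====
def Spec_split_voor_marian_py (text : String) (max_chars : Int) (out : List String) : Prop := out = split_voor_marian_py_alt text max_chars
instance (text : String) (max_chars : Int) (out : List String) : Decidable (Spec_split_voor_marian_py text max_chars out) := by unfold Spec_split_voor_marian_py; infer_instance

-- ===== CLAIM (what is proved, stated in full; the proofs are below) =====
def Claim_equal_split_voor_marian_py : Prop := ∀ (text : String) (max_chars : Int), Dom_split_voor_marian_py text max_chars → Spec_split_voor_marian_py text max_chars (split_voor_marian_py text max_chars)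

-- ===== LEMMAS AND PROOFS =====

-- a successful scan returns an in-range index
theorem pvScanGo_lt : ∀ (rest : List Char) (s : List Char) (k i : Nat), rest = s.drop k →
    pvScanGo s rest k = some i → i < s.length := by
  intro rest
  induction rest with
  | nil => intro s k i _ h; exact absurd h (by simp [pvScanGo])
  | cons c rest ih =>
    intro s k i hrest h
    have hk : k < s.length := by
      have := congrArg List.length hrest
      simp at this
      omega
    rw [pvScanGo] at h
    split at h
    · cases h; exact hk
    · refine ih s (k + 1) i ?_ h
      have := List.drop_eq_getElem_cons hk
      rw [this] at hrest
      exact (List.cons_eq_cons.mp hrest.symm).2.symm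
theorem pvScan_lt {s : List Char} {k i : Nat} (h : pvScan s k = some i) : i < s.length :=
  pvScanGo_lt (s.drop k) s k i rfl h

-- within one segment search, A's fold with buffer = processed prefix behaves as the scan says:
-- it jumps to the first cut (emitting the stripped prefix) or runs out with buffer = s
theorem pvFoldScan : ∀ (rest : List Char) (s : List Char) (k : Nat) (segs : List String),
    rest = s.drop k →
    rest.foldl pvStepA (segs, s.take k) =
      (match pvScanGo s rest k with
       | some i => (s.drop (i + 1)).foldl pvStepA
           (segs ++ [String.ofList (PySem.Chars.strip (s.take (i + 1)))], ([] : List Char))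
       | none => (segs, s)) := by
  intro rest
  induction rest with
  | nil =>
    intro s k segs hrest
    have hk : s.length ≤ k := by
      have := congrArg List.length hrest
      simp at this
      omega
    simp only [pvScanGo, List.foldl_nil, List.take_of_length_le hk]
  | cons c rest ih =>
    intro s k segs hrest
    have hk : k < s.length := by
      have := congrArg List.length hrest
      simp at this
      omega
    have hcons := List.drop_eq_getElem_cons hk
    rw [hcons] at hrest
    obtain ⟨hc, hrest'⟩ := List.cons_eq_cons.mp hrest.symm
    subst hc
    rw [List.foldl_cons]
    have hbuf : pvStepA (segs, s.take k) s[k] =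
        if (s[k] == '.' || s[k] == '!' || s[k] == '?' || s[k] == '\n') &&
            decide (20 < (PySem.Chars.strip (s.take (k + 1))).length) then
          (segs ++ [String.ofList (PySem.Chars.strip (s.take (k + 1)))], ([] : List Char))
        else (segs, s.take (k + 1)) := by
      simp only [pvStepA, ← List.take_concat_get' s k hk]
    rw [hbuf, pvScanGo]
    by_cases hc2 : ((s[k] == '.' || s[k] == '!' || s[k] == '?' || s[k] == '\n') &&
        decide (20 < (PySem.Chars.strip (s.take (k + 1))).length)) = true
    · rw [if_pos hc2, if_pos hc2]
      subst hrest'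
      rfl
    · rw [if_neg hc2, if_neg hc2]
      exact ih s (k + 1) segs hrest'.symm

-- A's fold from an empty buffer, followed by A's final flush, computes segs ++ pvSegsGo n s
theorem pvMain (n : Nat) : ∀ (s : List Char) (segs : List String), s.length < n →
    (let st := s.foldl pvStepA (segs, ([] : List Char));
     if (PySem.Chars.strip st.2).isEmpty then st.1
     else st.1 ++ [String.ofList (PySem.Chars.strip st.2)]) = segs ++ pvSegsGo n s := by
  induction n with
  | zero => intro s segs hle; omega
  | succ n ih =>
    intro s segs hle
    have h0 : s.foldl pvStepA (segs, ([] : List Char)) =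
        (s.drop 0).foldl pvStepA (segs, s.take 0) := by simp
    have hfold := pvFoldScan (s.drop 0) s 0 segs rfl
    rw [show pvScanGo s (s.drop 0) 0 = pvScan s 0 from rfl] at hfold
    rw [pvSegsGo]
    cases hscan : pvScan s 0 with
    | some i =>
      have hi : i < s.length := pvScan_lt hscan
      rw [hscan] at hfold
      simp only [h0, hfold]
      have := ih (s.drop (i + 1))
        (segs ++ [String.ofList (PySem.Chars.strip (s.take (i + 1)))])
        (by simp only [List.length_drop]; omega)
      simp only [this, List.append_assoc, List.singleton_append]
    | none =>
      rw [hscan] at hfold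
      simp only [h0, hfold]
      by_cases he : (PySem.Chars.strip s).isEmpty = true
      · simp [he]
      · simp [he]

-- ===== VERDICT (by name: the statement is the Claim_ definition above) =====
theorem split_voor_marian_py_spec : Claim_equal_split_voor_marian_py := by
  intro text max_chars _
  unfold Spec_split_voor_marian_py split_voor_marian_py split_voor_marian_py_alt
  by_cases hlen : (PySem.Str.len text : Int) ≤ max_chars
  · rw [if_pos hlen, if_pos hlen]
  · rw [if_neg hlen, if_neg hlen]
    have := pvMain (text.toList.length + 1) text.toList [] (by omega)
    simp only [List.nil_append] at this
    unfold pvSegs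
    simp only [this]
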